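-- pv_equiv track=rewrite | github.com/Atlante45/Advent-of-Code | solutions/y2018/d03.py | parts
-- ===== SOURCE A (Python) =====
-- from collections import defaultdict
--
-- def parts(claims):
--     fabric = defaultdict(int)
--     for _, x, y, w, h in claims:
--         for i in range(x, x + w):
--             for j in range(y, y + h):
--                 fabric[(i, j)] += 1
--
--     res1 = sum(1 for v in fabric.values() if v > 1)
--     res2 = None
--
--     def valid(x, y, w, h):
--         for i in range(x, x + w):
--             for j in range(y, y + h):
--                 if fabric[(i, j)] != 1:
--                     return False
--         return True
--
--     for id, x, y, w, h in claims:
--         if valid(x, y, w, h):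
--             res2 = id
--             break
--
--     return res1, res2
-- ===== SOURCE B (Python) =====
-- def parts(claims):
--     # res1: one pass over claim cells with two sets (no count dict, no value scan)
--     seen = set()
--     overlapped = set()
--     for _, x, y, w, h in claims:
--         for i in range(x, x + w):
--             for j in range(y, y + h):
--                 if (i, j) in seen:
--                     overlapped.add((i, j))
--                 else:
--                     seen.add((i, j))
--     res1 = len(overlapped)
--
--     # res2: a claim is intact iff its rectangle is disjoint from every other claim's
--     # rectangle (pairwise interval arithmetic, no per-cell rescans)
--     res2 = None
--     for k, (id, x, y, w, h) in enumerate(claims):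
--         others = claims[:k] + claims[k + 1:]
--         if all(not (max(x, x2) < min(x + w, x2 + w2)
--                     and max(y, y2) < min(y + h, y2 + h2))
--                for _, x2, y2, w2, h2 in others):
--             res2 = id
--             break
--     return res1, res2
-- ===== Notes on version B (the rewrite author's own statement) =====
-- stated objective: alternative
-- what changed: B replaces the per-cell count dictionary and its value scan by a seen/overlapped pair of sets built in one pass, and replaces A's per-cell rescan of each claim's rectangle by a pairwise rectangle-disjointness test in interval arithmetic.
import Mathlib
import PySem

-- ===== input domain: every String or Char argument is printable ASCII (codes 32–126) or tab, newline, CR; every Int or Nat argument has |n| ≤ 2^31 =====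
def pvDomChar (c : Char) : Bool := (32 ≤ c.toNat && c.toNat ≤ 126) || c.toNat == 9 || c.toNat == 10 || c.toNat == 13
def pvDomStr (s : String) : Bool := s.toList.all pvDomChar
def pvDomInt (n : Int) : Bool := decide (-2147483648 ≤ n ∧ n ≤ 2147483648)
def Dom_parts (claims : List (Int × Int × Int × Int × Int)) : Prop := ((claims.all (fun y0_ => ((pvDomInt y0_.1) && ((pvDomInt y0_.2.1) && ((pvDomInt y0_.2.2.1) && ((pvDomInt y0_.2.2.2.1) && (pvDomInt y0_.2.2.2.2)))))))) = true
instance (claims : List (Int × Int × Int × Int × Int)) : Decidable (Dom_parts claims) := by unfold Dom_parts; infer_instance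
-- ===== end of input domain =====

-- B replaces A's per-cell count dictionary + value scan by one pass with a seen/overlapped
-- pair of sets, and A's per-cell rescan of each claim by a pairwise rectangle-disjointness
-- test in interval arithmetic (alternative algorithm; equivalence of the return value).
-- Both ports model Python's hash containers with Std.HashMap/Std.HashSet (exact here: the
-- dict and the sets are only consumed order-insensitively — lookups, a count, a length).

-- ===== PORT A =====
-- fabric: defaultdict(int) incremented over every cell of every claim
def partsFabric (claims : List (Int × Int × Int × Int × Int)) : Std.HashMap (Int × Int) Int :=
  claims.foldl (fun d c =>
    match c with
    | (_, x, y, w, h) =>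
      (PySem.List.pyRange x (x + w) 1).foldl (fun d i =>
        (PySem.List.pyRange y (y + h) 1).foldl (fun d j =>
          d.insert (i, j) (d.getD (i, j) 0 + 1)) d) d) ∅

-- valid(x, y, w, h); 'fabric[(i,j)] != 1' on a defaultdict reads value 0 for a missing key
-- (the silent insertion of 0 can never change a later lookup's value), so getD _ 0 is exact
def partsValid (fabric : Std.HashMap (Int × Int) Int) (x y w h : Int) : Bool :=
  (PySem.List.pyRange x (x + w) 1).all fun i =>
    (PySem.List.pyRange y (y + h) 1).all fun j => fabric.getD (i, j) 0 == 1

-- the 'for id, … in claims: if valid: res2 = id; break' loop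
def partsFind (fabric : Std.HashMap (Int × Int) Int) :
    List (Int × Int × Int × Int × Int) → Option Int
  | [] => none
  | (id, x, y, w, h) :: rest =>
      if partsValid fabric x y w h then some id else partsFind fabric rest

-- res1 = sum(1 for v in fabric.values() if v > 1): one pass over the stored values
def parts (claims : List (Int × Int × Int × Int × Int)) : Int × Option Int :=
  let fabric := partsFabric claims
  let res1 : Int := fabric.fold (fun acc _ v => if 1 < v then acc + 1 else acc) 0
  (res1, partsFind fabric claims)

-- ===== PORT B =====
-- one pass building (seen, overlapped)
def altScan (claims : List (Int × Int × Int × Int × Int)) :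
    Std.HashSet (Int × Int) × Std.HashSet (Int × Int) :=
  claims.foldl (fun st c =>
    match c with
    | (_, x, y, w, h) =>
      (PySem.List.pyRange x (x + w) 1).foldl (fun st i =>
        (PySem.List.pyRange y (y + h) 1).foldl (fun st j =>
          if st.1.contains (i, j) then (st.1, st.2.insert (i, j))
          else (st.1.insert (i, j), st.2)) st) st)
    (∅, ∅)

-- not (max(x,x2) < min(x+w,x2+w2) and max(y,y2) < min(y+h,y2+h2))
def altDisjoint (c o : Int × Int × Int × Int × Int) : Bool :=
  match c, o with
  | (_, x, y, w, h), (_, x2, y2, w2, h2) =>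
    !(decide (max x x2 < min (x + w) (x2 + w2)) && decide (max y y2 < min (y + h) (y2 + h2)))

-- 'for k, c in enumerate(claims): others = claims[:k] + claims[k+1:]; if all(disjoint) …'
-- carried as a prefix accumulator (pre = claims[:k])
def altFind (pre : List (Int × Int × Int × Int × Int)) :
    List (Int × Int × Int × Int × Int) → Option Int
  | [] => none
  | c :: suf =>
      if (pre ++ suf).all (altDisjoint c) then some c.1 else altFind (pre ++ [c]) suf

def parts_alt (claims : List (Int × Int × Int × Int × Int)) : Int × Option Int :=
  let st := altScan claims
  ((st.2.size : Int), altFind [] claims)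

-- ===== PRECONDITION & SPEC =====
def Spec_parts (claims : List (Int × Int × Int × Int × Int)) (out : Int × Option Int) : Prop := out = parts_alt claims
instance (claims : List (Int × Int × Int × Int × Int)) (out : Int × Option Int) : Decidable (Spec_parts claims out) := by unfold Spec_parts; infer_instance

-- ===== CLAIM (what is proved, stated in full; the proofs are below) =====
def Claim_equal_parts : Prop := ∀ (claims : List (Int × Int × Int × Int × Int)), Dom_parts claims → Spec_parts claims (parts claims)

-- ===== LEMMAS AND PROOFS =====

-- the cells of one claim, as a list
def pvCells (c : Int × Int × Int × Int × Int) : List (Int × Int) :=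
  (PySem.List.pyRange c.2.1 (c.2.1 + c.2.2.2.1) 1) ×ˢ
    (PySem.List.pyRange c.2.2.1 (c.2.2.1 + c.2.2.2.2) 1)

def pvCovers (c : Int × Int × Int × Int × Int) (p : Int × Int) : Bool :=
  decide (c.2.1 ≤ p.1 ∧ p.1 < c.2.1 + c.2.2.2.1 ∧ c.2.2.1 ≤ p.2 ∧ p.2 < c.2.2.1 + c.2.2.2.2)

-- all cells of all claims (with multiplicity)
def pvAllCells (claims : List (Int × Int × Int × Int × Int)) : List (Int × Int) :=
  claims.flatMap pvCells

theorem pvMem_cells (c : Int × Int × Int × Int × Int) (p : Int × Int) :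
    p ∈ pvCells c ↔ pvCovers c p = true := by
  obtain ⟨i, j⟩ := p
  simp [pvCells, pvCovers, List.mem_product, PySem.List.mem_pyRange_one, and_assoc]

theorem pvNodup_cells (c : Int × Int × Int × Int × Int) : (pvCells c).Nodup :=
  List.Nodup.product (PySem.List.nodup_pyRange_one _ _) (PySem.List.nodup_pyRange_one _ _)

theorem pvCount_cells (c : Int × Int × Int × Int × Int) (p : Int × Int) :
    (pvCells c).count p = if pvCovers c p then 1 else 0 := by
  by_cases h : pvCovers c p = true
  · simp [h, List.count_eq_one_of_mem (pvNodup_cells c) ((pvMem_cells c p).2 h)]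
  · simp [h, List.count_eq_zero_of_not_mem (fun hm => h ((pvMem_cells c p).1 hm))]

theorem pvCount_allCells (claims : List (Int × Int × Int × Int × Int)) (p : Int × Int) :
    (pvAllCells claims).count p = claims.countP (fun c => pvCovers c p) := by
  induction claims with
  | nil => simp [pvAllCells]
  | cons c rest ih =>
    simp [pvAllCells, List.flatMap_cons, List.count_append, pvCount_cells,
      List.countP_cons] at *
    rw [ih]
    by_cases h : pvCovers c p = true
    · simp [h]; omega
    · simp [h]

-- the nested A fold over one claim is the flat fold over its cells
theorem pvFabric_eq_flat (claims : List (Int × Int × Int × Int × Int)) :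
    partsFabric claims =
      (pvAllCells claims).foldl (fun d p => d.insert p (d.getD p 0 + 1)) ∅ := by
  unfold partsFabric pvAllCells
  rw [List.foldl_flatMap]
  apply PySem.List.foldl_congr_mem
  intro d c _
  obtain ⟨id, x, y, w, h⟩ := c
  show _ = ((_ ×ˢ _ : List (Int × Int)).foldl _ d)
  rw [show ((PySem.List.pyRange x (x + w) 1) ×ˢ (PySem.List.pyRange y (y + h) 1) : List (Int × Int)) = (PySem.List.pyRange x (x + w) 1).flatMap (fun i => (PySem.List.pyRange y (y + h) 1).map (Prod.mk i)) from rfl]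
  rw [List.foldl_flatMap]
  apply PySem.List.foldl_congr_mem
  intro d i _
  rw [List.foldl_map]

-- effect of the insert-increment fold on one lookup
theorem pvBuild_get? (L : List (Int × Int)) (m : Std.HashMap (Int × Int) Int) (p : Int × Int) :
    (L.foldl (fun d q => d.insert q (d.getD q 0 + 1)) m)[p]? =
      if p ∈ L then some (m.getD p 0 + (L.count p : Int)) else m[p]? := by
  induction L generalizing m with
  | nil => simp
  | cons q L ih =>
    simp only [List.foldl_cons]
    rw [ih]
    by_cases hq : p = q
    · subst hq
      simp [List.count_cons_self]
      by_cases hL : p ∈ L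
      · simp [hL]; ring
      · simp [hL, List.count_eq_zero_of_not_mem hL, Std.HashMap.getD_eq_getD_getElem?]
    · have hbeq : (q == p) = false := by simp [Ne.symm hq]
      simp only [List.mem_cons, Std.HashMap.getD_insert, Std.HashMap.getElem?_insert, hbeq,
        Bool.false_eq_true, if_false, List.count_cons]
      by_cases hL : p ∈ L
      · simp [hL, hq]
      · simp [hL, hq]

theorem pvFabric_get? (claims : List (Int × Int × Int × Int × Int)) (p : Int × Int) :
    (partsFabric claims)[p]? =
      if p ∈ pvAllCells claims then some (((pvAllCells claims).count p : Int)) else none := by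
  rw [pvFabric_eq_flat, pvBuild_get?]
  simp

theorem pvFabric_getD (claims : List (Int × Int × Int × Int × Int)) (p : Int × Int) :
    (partsFabric claims).getD p 0 = ((pvAllCells claims).count p : Int) := by
  rw [Std.HashMap.getD_eq_getD_getElem?, pvFabric_get?]
  by_cases h : p ∈ pvAllCells claims
  · simp [h]
  · simp [h, List.count_eq_zero_of_not_mem h]

-- one step of B's scan
def pvStep (st : Std.HashSet (Int × Int) × Std.HashSet (Int × Int)) (p : Int × Int) :
    Std.HashSet (Int × Int) × Std.HashSet (Int × Int) :=
  if st.1.contains p then (st.1, st.2.insert p) else (st.1.insert p, st.2)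

-- B's scan flattened the same way
theorem pvAltScan_eq_flat (claims : List (Int × Int × Int × Int × Int)) :
    altScan claims = (pvAllCells claims).foldl pvStep (∅, ∅) := by
  unfold altScan pvAllCells
  rw [List.foldl_flatMap]
  apply PySem.List.foldl_congr_mem
  intro st c _
  obtain ⟨id, x, y, w, h⟩ := c
  show _ = ((_ ×ˢ _ : List (Int × Int)).foldl _ st)
  rw [show ((PySem.List.pyRange x (x + w) 1) ×ˢ (PySem.List.pyRange y (y + h) 1) : List (Int × Int)) = (PySem.List.pyRange x (x + w) 1).flatMap (fun i => (PySem.List.pyRange y (y + h) 1).map (Prod.mk i)) from rfl]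
  rw [List.foldl_flatMap]
  apply PySem.List.foldl_congr_mem
  intro st i _
  rw [List.foldl_map]
  simp only [pvStep]

-- invariant of the seen/overlapped fold
theorem pvScan_invariant (L : List (Int × Int)) (s o : Std.HashSet (Int × Int)) :
    (∀ p, p ∈ (L.foldl pvStep (s, o)).1 ↔ p ∈ s ∨ p ∈ L) ∧
      (∀ p, p ∈ (L.foldl pvStep (s, o)).2 ↔ p ∈ o ∨ (p ∈ s ∧ p ∈ L) ∨ 2 ≤ L.count p) := by
  induction L generalizing s o with
  | nil => simp
  | cons p L ih =>
    simp only [List.foldl_cons]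
    by_cases hp : p ∈ s
    · rw [show pvStep (s, o) p = (s, o.insert p) by
        simp [pvStep, Std.HashSet.mem_iff_contains.1 hp]]
      obtain ⟨h3, h4⟩ := ih s (o.insert p)
      refine ⟨fun q => ?_, fun q => ?_⟩
      · rw [h3]
        by_cases hq : q = p
        · subst hq; simp [hp]
        · simp only [List.mem_cons]; tauto
      · rw [h4]
        simp only [Std.HashSet.mem_insert, beq_iff_eq, List.mem_cons]
        by_cases hq : q = p
        · subst hq; simp [hp]
        · have hcnt : (p :: L).count q = L.count q := by
            simp [Ne.symm hq]
          rw [hcnt]; tauto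
    · rw [show pvStep (s, o) p = (s.insert p, o) by
        have : s.contains p = false := by
          rw [Bool.eq_false_iff]
          exact fun h => hp (Std.HashSet.mem_iff_contains.2 h)
        simp [pvStep, this]]
      obtain ⟨h3, h4⟩ := ih (s.insert p) o
      refine ⟨fun q => ?_, fun q => ?_⟩
      · rw [h3]; simp only [Std.HashSet.mem_insert, beq_iff_eq, List.mem_cons]; tauto
      · rw [h4]
        simp only [Std.HashSet.mem_insert, beq_iff_eq, List.mem_cons]
        by_cases hq : q = p
        · subst hq
          rw [List.count_cons_self]
          constructor
          · rintro (h | h | h)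
            · exact Or.inl h
            · have := List.count_pos_iff.2 h.2; omega
            · omega
          · rintro (h | h | h)
            · exact Or.inl h
            · exact absurd h.1 hp
            · by_cases hL : q ∈ L
              · exact Or.inr (Or.inl ⟨Or.inl rfl, hL⟩)
              · have := List.count_eq_zero_of_not_mem hL; omega
        · have hcnt : (p :: L).count q = L.count q := by
            simp [Ne.symm hq]
          rw [hcnt]; tauto

-- first loop of A equals B's res1
theorem pvRes1_eq (claims : List (Int × Int × Int × Int × Int)) :
    (partsFabric claims).fold (fun acc _ v => if 1 < v then acc + 1 else acc) (0 : Int)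
      = ((altScan claims).2.size : Int) := by
  rw [Std.HashMap.fold_eq_foldl_toList,
    PySem.List.foldl_ite_add_one (fun b : (Int × Int) × Int => (1 : Int) < b.2),
    pvAltScan_eq_flat]
  obtain ⟨-, h4⟩ := pvScan_invariant (pvAllCells claims) ∅ ∅
  have hmem : ∀ p, p ∈ (List.foldl pvStep (∅, ∅) (pvAllCells claims)).2 ↔
      2 ≤ (pvAllCells claims).count p := by
    intro p; rw [h4 p]; simp
  have hndA : (((partsFabric claims).toList.filter
      (fun b => decide ((1 : Int) < b.2))).map Prod.fst).Nodup := by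
    have hd := Std.HashMap.distinct_keys_toList (m := partsFabric claims)
    have hf := hd.sublist
      (List.filter_sublist (p := fun b => decide ((1 : Int) < b.2)))
    rw [List.nodup_iff_pairwise_ne, List.pairwise_map]
    exact hf.imp (by intro a b h; simpa using h)
  have hndB : (List.foldl pvStep (∅, ∅) (pvAllCells claims)).2.toList.Nodup := by
    have hd := Std.HashSet.distinct_toList
      (m := (List.foldl pvStep (∅, ∅) (pvAllCells claims)).2)
    rw [List.nodup_iff_pairwise_ne]
    exact hd.imp (by intro a b h; simpa using h)
  have hperm : ((((partsFabric claims).toList.filter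
        (fun b => decide ((1 : Int) < b.2))).map Prod.fst)).Perm
      (List.foldl pvStep (∅, ∅) (pvAllCells claims)).2.toList := by
    rw [List.perm_ext_iff_of_nodup hndA hndB]
    intro c
    rw [Std.HashSet.mem_toList, hmem c, List.mem_map]
    constructor
    · rintro ⟨b, hb, rfl⟩
      rw [List.mem_filter] at hb
      obtain ⟨hb1, hb2⟩ := hb
      obtain ⟨k, v⟩ := b
      rw [Std.HashMap.mem_toList_iff_getElem?_eq_some, pvFabric_get?] at hb1
      simp only [decide_eq_true_eq] at hb2
      by_cases hk : k ∈ pvAllCells claims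
      · simp only [hk, if_true, Option.some_inj] at hb1
        subst hb1
        exact_mod_cast hb2
      · simp [hk] at hb1
    · intro hc
      refine ⟨(c, ((pvAllCells claims).count c : Int)), ?_, rfl⟩
      rw [List.mem_filter, Std.HashMap.mem_toList_iff_getElem?_eq_some, pvFabric_get?]
      have hcL : c ∈ pvAllCells claims := List.count_pos_iff.1 (by omega)
      refine ⟨by simp [hcL], ?_⟩
      simp only [decide_eq_true_eq]
      exact_mod_cast hc
  have hlen := hperm.length_eq
  rw [List.length_map] at hlen
  rw [List.countP_eq_length_filter, hlen, Std.HashSet.length_toList]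
  simp

-- geometry: a rectangle avoids every cell of another iff the interval test says disjoint
theorem pvDisjoint_iff (c o : Int × Int × Int × Int × Int) :
    altDisjoint c o = true ↔ ∀ p, pvCovers c p = true → pvCovers o p = false := by
  obtain ⟨i1, x, y, w, h⟩ := c
  obtain ⟨i2, x2, y2, w2, h2⟩ := o
  constructor
  · intro hd p hc
    obtain ⟨a, b⟩ := p
    simp only [pvCovers, decide_eq_true_eq] at hc
    simp only [altDisjoint, Bool.not_eq_true', Bool.and_eq_false_iff,
      decide_eq_false_iff_not, not_lt] at hd
    simp only [pvCovers, decide_eq_false_iff_not]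
    omega
  · intro hall
    simp only [altDisjoint, Bool.not_eq_true', Bool.and_eq_false_iff,
      decide_eq_false_iff_not, not_lt]
    by_contra hcon
    push Not at hcon
    obtain ⟨hx, hy⟩ := hcon
    have h1 := hall (max x x2, max y y2) (by simp only [pvCovers, decide_eq_true_eq]; omega)
    simp only [pvCovers, decide_eq_false_iff_not] at h1
    omega

-- validity of one claim at position pre.length
theorem pvValid_iff (pre suf : List (Int × Int × Int × Int × Int))
    (c : Int × Int × Int × Int × Int) :
    partsValid (partsFabric (pre ++ c :: suf)) c.2.1 c.2.2.1 c.2.2.2.1 c.2.2.2.2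
      = (pre ++ suf).all (altDisjoint c) := by
  have hval : partsValid (partsFabric (pre ++ c :: suf)) c.2.1 c.2.2.1 c.2.2.2.1 c.2.2.2.2 = true ↔
      ∀ p, pvCovers c p = true → (partsFabric (pre ++ c :: suf)).getD p 0 = 1 := by
    simp only [partsValid, List.all_eq_true, PySem.List.mem_pyRange_one, beq_iff_eq]
    constructor
    · intro H p hp
      obtain ⟨a, b⟩ := p
      simp only [pvCovers, decide_eq_true_eq] at hp
      exact H a ⟨hp.1, hp.2.1⟩ b ⟨hp.2.2.1, hp.2.2.2⟩
    · intro H i hi j hj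
      exact H (i, j) (by simp only [pvCovers, decide_eq_true_eq]; exact ⟨hi.1, hi.2, hj.1, hj.2⟩)
  have hcnt : ∀ p, pvCovers c p = true →
      ((partsFabric (pre ++ c :: suf)).getD p 0 = 1 ↔
        (pre ++ suf).countP (fun o => pvCovers o p) = 0) := by
    intro p hp
    rw [pvFabric_getD, pvCount_allCells]
    have hstep : (pre ++ c :: suf).countP (fun o => pvCovers o p)
        = (pre ++ suf).countP (fun o => pvCovers o p) + 1 := by
      simp [List.countP_append, hp]
      omega
    rw [hstep]
    constructor <;> intro h1 <;> omega
  rw [Bool.eq_iff_iff, hval, List.all_eq_true]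
  constructor
  · intro H o ho
    rw [pvDisjoint_iff]
    intro p hp
    have h1 := (hcnt p hp).1 (H p hp)
    rw [List.countP_eq_zero] at h1
    simpa using h1 o ho
  · intro H p hp
    rw [hcnt p hp, List.countP_eq_zero]
    intro o ho
    have hd := (pvDisjoint_iff c o).1 (H o ho) p hp
    simp [hd]

theorem pvFind_eq (claims : List (Int × Int × Int × Int × Int)) :
    ∀ pre suf, claims = pre ++ suf →
      partsFind (partsFabric claims) suf = altFind pre suf := by
  intro pre suf
  induction suf generalizing pre with
  | nil => intro _; rfl
  | cons c suf ih =>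
    intro h
    obtain ⟨id, x, y, w, ht⟩ := c
    simp only [partsFind, altFind]
    have hv : partsValid (partsFabric claims) x y w ht
        = (pre ++ suf).all (altDisjoint (id, x, y, w, ht)) := by
      rw [h]; exact pvValid_iff pre suf (id, x, y, w, ht)
    rw [hv]
    by_cases hcond : ((pre ++ suf).all (altDisjoint (id, x, y, w, ht))) = true
    · rw [if_pos hcond, if_pos hcond]
    · rw [if_neg hcond, if_neg hcond]
      exact ih (pre ++ [(id, x, y, w, ht)]) (by rw [h]; simp)

-- ===== VERDICT (by name: the statement is the Claim_ definition above) =====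
theorem parts_spec : Claim_equal_parts := by
  intro claims _
  unfold Spec_parts parts parts_alt
  simp only []
  rw [pvRes1_eq, pvFind_eq claims [] claims rfl]
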